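-- pv_equiv track=rewrite | github.com/danibi1502/FindingPowersetOfASet | ispartition.py | ispartition
-- ===== SOURCE A (Python) =====
-- def ispartition(subsets:list, check_set:set) -> bool:
--     """
--     Checks if given subsets are partitions of a given set
--
--     params:
--     subsets : list
--         A list of sets
--     check_set : set
--         The set function checks if subsets are  partitions of
--
--     returns:
--     result : bool
--         True if susbets are partitions of set and False otherwise
--     """
--
--     def adds_up(subsets:list, check_set:set) -> bool:
--         add_set = set()
--         for subset in subsets:
--             add_set.update(subset)
--         return add_set==check_set
--
--     def no_repititions(subsets:list) -> bool:
--         seen:list = []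
--         for subset in subsets:
--             for element in subset:
--                 if element not in seen: seen.append(element)
--                 else: return False
--         return True
--
--     return (adds_up(subsets, check_set) and no_repititions(subsets))
-- ===== SOURCE B (Python) =====
-- def ispartition(subsets: list, check_set: set) -> bool:
--     union = set()
--     total = 0
--     for subset in subsets:
--         union |= subset
--         total += len(subset)
--     return union == check_set and total == len(check_set)
-- ===== Notes on version B (the rewrite author's own statement) =====
-- stated objective: simpler
-- what changed: Replaces A's two passes (union-building plus an element-by-element 'seen' list scan for duplicates) with one loop that accumulates the union and a size total, deciding disjointness by the cardinality identity total == len(check_set).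
import Mathlib
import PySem

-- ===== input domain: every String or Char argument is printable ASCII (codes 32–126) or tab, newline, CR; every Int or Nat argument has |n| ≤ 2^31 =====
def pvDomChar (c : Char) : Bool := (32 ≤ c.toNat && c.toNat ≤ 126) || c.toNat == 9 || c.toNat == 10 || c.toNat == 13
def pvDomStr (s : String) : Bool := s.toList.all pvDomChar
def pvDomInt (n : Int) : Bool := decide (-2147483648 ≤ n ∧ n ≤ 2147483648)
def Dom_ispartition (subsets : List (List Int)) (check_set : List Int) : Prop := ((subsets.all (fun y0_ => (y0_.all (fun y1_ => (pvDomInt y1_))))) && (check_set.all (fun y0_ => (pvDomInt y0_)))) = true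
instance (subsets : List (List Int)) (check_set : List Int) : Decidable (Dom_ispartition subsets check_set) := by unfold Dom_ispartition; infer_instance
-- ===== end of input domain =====

-- B replaces A's element-by-element 'seen' duplicate scan by the cardinality identity
-- |union| = sum of sizes, folding union and size total in one pass (objective: simpler).

-- ===== PORT A =====
-- helper adds_up: add_set = set(); for subset in subsets: add_set.update(subset); return add_set == check_set
def pvAddsUp (subsets : List (List Int)) (check_set : List Int) : Bool :=
  let add_set := subsets.foldl (fun s subset => PySem.Set.update s subset) PySem.Set.empty
  PySem.Set.equal add_set check_set

-- inner loop of no_repititions over one subset: none = early 'return False', some seen' = updated seen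
def pvNoRepsSub (subset : List Int) (seen : List Int) : Option (List Int) :=
  match subset with
  | [] => some seen
  | e :: es => if e ∈ seen then none else pvNoRepsSub es (seen ++ [e])

-- outer loop of no_repititions
def pvNoRepsGo (subsets : List (List Int)) (seen : List Int) : Bool :=
  match subsets with
  | [] => true
  | sub :: rest =>
    match pvNoRepsSub sub seen with
    | none => false
    | some seen' => pvNoRepsGo rest seen'

def pvNoRepititions (subsets : List (List Int)) : Bool := pvNoRepsGo subsets []

def ispartition (subsets : List (List Int)) (check_set : List Int) : Bool :=
  pvAddsUp subsets check_set && pvNoRepititions subsets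

-- ===== PORT B =====
def ispartition_alt (subsets : List (List Int)) (check_set : List Int) : Bool :=
  let st := subsets.foldl
    (fun (p : PySem.Set Int × Int) subset =>
      (PySem.Set.union p.1 subset, p.2 + (subset.length : Int)))
    (PySem.Set.empty, 0)
  PySem.Set.equal st.1 check_set && decide (st.2 = (check_set.length : Int))

-- ===== PRECONDITION & SPEC =====
-- Pre_ is only the set-representation invariant of the type convention (Python's arguments are
-- sets, so the modelling lists carry distinct elements); it excludes no actual Python input.
def Pre_ispartition (subsets : List (List Int)) (check_set : List Int) : Prop :=
  (∀ s ∈ subsets, s.Nodup) ∧ check_set.Nodup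
instance (subsets : List (List Int)) (check_set : List Int) : Decidable (Pre_ispartition subsets check_set) := by unfold Pre_ispartition; infer_instance

def pvWitness_ispartition : List (List Int) × List Int := ([[1], [2, 3]], [1, 2, 3])

def Spec_ispartition (subsets : List (List Int)) (check_set : List Int) (out : Bool) : Prop := out = ispartition_alt subsets check_set
instance (subsets : List (List Int)) (check_set : List Int) (out : Bool) : Decidable (Spec_ispartition subsets check_set out) := by unfold Spec_ispartition; infer_instance

-- ===== CLAIM (what is proved, stated in full; the proofs are below) =====
def Claim_equal_ispartition : Prop := ∀ (subsets : List (List Int)) (check_set : List Int), Dom_ispartition subsets check_set → Pre_ispartition subsets check_set → Spec_ispartition subsets check_set (ispartition subsets check_set)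

-- ===== LEMMAS AND PROOFS =====

theorem pvFoldUpdate (subsets : List (List Int)) (s : PySem.Set Int) :
    subsets.foldl (fun s subset => PySem.Set.update s subset) s
      = PySem.Set.update s subsets.flatten := by
  induction subsets generalizing s with
  | nil => simp [PySem.Set.update]
  | cons a rest ih =>
      simp only [List.foldl_cons, List.flatten_cons, ih, PySem.Set.update_append]

theorem pvFoldB (subsets : List (List Int)) (s : PySem.Set Int) (t : Int) :
    subsets.foldl
      (fun (p : PySem.Set Int × Int) subset =>
        (PySem.Set.union p.1 subset, p.2 + (subset.length : Int))) (s, t)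
      = (PySem.Set.update s subsets.flatten, t + (subsets.flatten.length : Int)) := by
  induction subsets generalizing s t with
  | nil => simp [PySem.Set.update]
  | cons a rest ih =>
      simp only [List.foldl_cons]
      rw [ih]
      simp only [List.flatten_cons, PySem.Set.union, PySem.Set.update_append,
        List.length_append]
      push_cast
      ring_nf

theorem pvNoRepsSub_eq (subset seen : List Int) (h : seen.Nodup) :
    pvNoRepsSub subset seen
      = if (seen ++ subset).Nodup then some (seen ++ subset) else none := by
  induction subset generalizing seen with
  | nil => simp [pvNoRepsSub, h]
  | cons e es ih =>
      by_cases he : e ∈ seen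
      · have : ¬ (seen ++ e :: es).Nodup := by
          intro hn
          exact (List.disjoint_of_nodup_append hn) he List.mem_cons_self
        simp [pvNoRepsSub, he, this]
      · have h' : (seen ++ [e]).Nodup :=
          h.append (List.nodup_singleton e) (List.disjoint_singleton.mpr he)
        have := ih (seen ++ [e]) h'
        simp only [pvNoRepsSub, he, if_false, this, List.append_assoc, List.singleton_append]

theorem pvNoRepsGo_eq (subsets : List (List Int)) (seen : List Int) (h : seen.Nodup) :
    pvNoRepsGo subsets seen = decide (seen ++ subsets.flatten).Nodup := by
  induction subsets generalizing seen with
  | nil => simp [pvNoRepsGo, h]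
  | cons sub rest ih =>
      rw [pvNoRepsGo, pvNoRepsSub_eq sub seen h]
      by_cases hn : (seen ++ sub).Nodup
      · rw [if_pos hn]
        simp only [ih _ hn, List.flatten_cons, ← List.append_assoc]
      · rw [if_neg hn]
        have hns : ¬ (seen ++ (sub ++ rest.flatten)).Nodup := by
          intro hc
          exact hn (hc.sublist ((List.sublist_append_left sub rest.flatten).append_left seen))
        simp [List.flatten_cons, hns]

-- two Nodup lists with the same members have the same length
theorem pvLenEq {l₁ l₂ : List Int} (h₁ : l₁.Nodup) (h₂ : l₂.Nodup)
    (hm : ∀ x, x ∈ l₁ ↔ x ∈ l₂) : l₁.length = l₂.length :=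
  ((List.perm_ext_iff_of_nodup h₁ h₂).2 hm).length_eq

-- |set(F)| = |F| forces F to be duplicate-free
theorem pvNodup_of_len (F : List Int) (h : (PySem.Set.ofList F).length = F.length) :
    F.Nodup := by
  have h1 : (PySem.Set.ofList F).toFinset = F.toFinset := by
    ext x
    simp [List.mem_toFinset, PySem.Set.mem_ofList]
  have h2 : (PySem.Set.ofList F).toFinset.card = (PySem.Set.ofList F).length :=
    List.toFinset_card_of_nodup (PySem.Set.nodup_ofList F)
  have h3 : F.dedup.length = F.length := by
    rw [← List.card_toFinset, ← h1, h2, h]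
  have h4 : F.dedup = F := (List.dedup_sublist F).eq_of_length h3
  rw [← List.dedup_eq_self]
  exact h4

theorem ispartition_eq (subsets : List (List Int)) (check_set : List Int)
    (hpre : Pre_ispartition subsets check_set) :
    ispartition subsets check_set = ispartition_alt subsets check_set := by
  obtain ⟨hsubs, hcs⟩ := hpre
  rw [ispartition, ispartition_alt, pvAddsUp, pvNoRepititions]
  simp only [pvFoldUpdate, pvFoldB, PySem.Set.update_empty, List.nil_append, zero_add,
    pvNoRepsGo_eq subsets [] List.nodup_nil]
  set F := subsets.flatten with hF
  by_cases heq : PySem.Set.equal (PySem.Set.ofList F) check_set = true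
  · rw [heq]
    simp only [Bool.true_and]
    have hmem : ∀ x, x ∈ F ↔ x ∈ check_set := by
      intro x
      rw [← PySem.Set.mem_ofList (xs := F)]
      exact (PySem.Set.equal_iff _ _).1 heq x
    rw [decide_eq_decide]
    constructor
    · intro hnd
      have := pvLenEq hnd hcs hmem
      exact_mod_cast this
    · intro hlen
      have hlen' : F.length = check_set.length := by exact_mod_cast hlen
      have hmo : ∀ x, x ∈ PySem.Set.ofList F ↔ x ∈ check_set := by
        intro x; rw [PySem.Set.mem_ofList]; exact hmem x
      have : (PySem.Set.ofList F).length = check_set.length :=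
        pvLenEq (PySem.Set.nodup_ofList F) hcs hmo
      exact pvNodup_of_len F (by rw [this, hlen'])
  · rw [Bool.not_eq_true] at heq
    rw [heq]
    simp

-- ===== VERDICT (by name: the statement is the Claim_ definition above) =====
theorem ispartition_spec : Claim_equal_ispartition := by
  intro subsets check_set _ hpre
  unfold Spec_ispartition
  exact ispartition_eq subsets check_set hpre
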